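-- pv_equiv track=rewrite | github.com/pypi-data/pypi-mirror-390 | packages/vulnmap/vulnmap-1.3.0-py3-none-any.whl/modules/collaboration/collaborative_scanner.py | _calculate_contributor_stats
-- ===== SOURCE A (Python) =====
-- from typing import Dict, List, Optional
--
-- def _calculate_contributor_stats(session: Dict) -> Dict[str, Dict]:
--     """Calculate statistics per contributor."""
--     stats = {}
--     for vuln in session['vulnerabilities']:
--         member = vuln.get('discovered_by', 'unknown')
--         if member not in stats:
--             stats[member] = {
--                 'vulnerabilities_found': 0,
--                 'critical': 0,
--                 'high': 0,
--                 'medium': 0,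
--                 'low': 0
--             }
--         stats[member]['vulnerabilities_found'] += 1
--         severity = vuln.get('severity', 'low')
--         if severity in stats[member]:
--             stats[member][severity] += 1
--     return stats
-- ===== SOURCE B (Python) =====
-- def _calculate_contributor_stats(session):
--     """Calculate statistics per contributor (group-by: per-member filtered scans)."""
--     vulns = session['vulnerabilities']
--     members = []
--     for v in vulns:
--         m = v.get('discovered_by', 'unknown')
--         if m not in members:
--             members.append(m)
--     stats = {}
--     for m in members:
--         mine = [v for v in vulns if v.get('discovered_by', 'unknown') == m]
--         stats[m] = {
--             'vulnerabilities_found': len(mine),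
--             'critical': sum(1 for v in mine if v.get('severity', 'low') == 'critical'),
--             'high': sum(1 for v in mine if v.get('severity', 'low') == 'high'),
--             'medium': sum(1 for v in mine if v.get('severity', 'low') == 'medium'),
--             'low': sum(1 for v in mine if v.get('severity', 'low') == 'low'),
--         }
--     return stats
-- ===== Notes on version B (the rewrite author's own statement) =====
-- stated objective: alternative
-- what changed: Replaces A's single pass that builds and mutates a nested per-member dict inline with a group-by: first collect the distinct members in order of first appearance, then for each member filter its vulnerabilities and count the group's size and each of the four severities by separate scans of the group (no counter mutation at all).
-- intended difference: On inputs where some vulnerability's severity (default 'low') is the literal string 'vulnerabilities_found', A counts that vulnerability twice in that member's 'vulnerabilities_found' total (its severity test matches the counter key itself); B counts it once, which is the intended total of vulnerabilities found. — e.g. on _calculate_contributor_stats([("vulnerabilities", [[("severity", "vulnerabilities_found")]])]): A returns [("unknown", [("vulnerabilities_found", 2), ("critical", 0), ("high", 0), ("medium", 0), ("low", 0)])], B returns [("unknown", [("vulnerabilities_found", 1), ("critical", 0), ("high", 0), ("medium", 0), ("low", 0)])]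
import Mathlib
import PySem

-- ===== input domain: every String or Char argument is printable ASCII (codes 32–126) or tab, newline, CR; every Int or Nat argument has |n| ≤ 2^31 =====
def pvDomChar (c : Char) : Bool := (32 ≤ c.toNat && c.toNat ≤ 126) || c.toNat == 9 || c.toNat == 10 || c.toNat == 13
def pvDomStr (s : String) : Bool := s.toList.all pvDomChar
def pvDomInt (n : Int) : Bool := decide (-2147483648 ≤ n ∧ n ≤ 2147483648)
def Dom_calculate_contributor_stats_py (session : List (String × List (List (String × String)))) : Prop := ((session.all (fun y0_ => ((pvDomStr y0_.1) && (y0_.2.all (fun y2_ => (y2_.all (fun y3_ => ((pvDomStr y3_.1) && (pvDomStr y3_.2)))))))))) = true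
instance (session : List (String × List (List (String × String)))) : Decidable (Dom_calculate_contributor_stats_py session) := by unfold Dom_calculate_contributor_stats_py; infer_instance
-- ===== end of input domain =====

-- B replaces A's single pass mutating a nested per-member dict by a group-by
-- (distinct members first, then per-member filtered scans); equivalence is about the return value.

-- ===== PORT A =====
-- literal transliteration of A: one loop mutating a nested dict keyed by member
def calculate_contributor_stats_py (session : List (String × List (List (String × String)))) : List (String × List (String × Int)) :=
  match (PySem.Dict.mk session).get? "vulnerabilities" with
  | none => []   -- KeyError: excluded by Pre_
  | some vulns =>
    let stats : PySem.Dict String (PySem.Dict String Int) :=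
      vulns.foldl (fun stats vuln =>
        let member := (PySem.Dict.mk vuln).getD "discovered_by" "unknown"
        let stats :=
          if stats.contains member then stats
          else stats.insert member (PySem.Dict.mk
            [("vulnerabilities_found", 0), ("critical", 0), ("high", 0), ("medium", 0), ("low", 0)])
        let stats := stats.modify member PySem.Dict.empty (fun d => d.modify "vulnerabilities_found" 0 (· + 1))
        let severity := (PySem.Dict.mk vuln).getD "severity" "low"
        if (stats.getD member PySem.Dict.empty).contains severity then
          stats.modify member PySem.Dict.empty (fun d => d.modify severity 0 (· + 1))
        else stats) PySem.Dict.empty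
    stats.items.map (fun p => (p.1, p.2.items))

-- ===== PORT B =====
-- literal transliteration of Source B: collect distinct members in first-appearance order,
-- then for each member filter its vulnerabilities and count by separate scans of the group
def calculate_contributor_stats_py_alt (session : List (String × List (List (String × String)))) : List (String × List (String × Int)) :=
  match (PySem.Dict.mk session).get? "vulnerabilities" with
  | none => []   -- KeyError: excluded by Pre_
  | some vulns =>
    let members : PySem.Set String :=
      vulns.foldl (fun ms v => PySem.Set.add ms ((PySem.Dict.mk v).getD "discovered_by" "unknown")) PySem.Set.empty
    let stats : PySem.Dict String (List (String × Int)) :=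
      members.foldl (fun stats m =>
        let mine := vulns.filter (fun v => (PySem.Dict.mk v).getD "discovered_by" "unknown" == m)
        stats.insert m
          [("vulnerabilities_found", (mine.length : Int)),
           ("critical", (mine.countP (fun v => (PySem.Dict.mk v).getD "severity" "low" == "critical") : Int)),
           ("high", (mine.countP (fun v => (PySem.Dict.mk v).getD "severity" "low" == "high") : Int)),
           ("medium", (mine.countP (fun v => (PySem.Dict.mk v).getD "severity" "low" == "medium") : Int)),
           ("low", (mine.countP (fun v => (PySem.Dict.mk v).getD "severity" "low" == "low") : Int))]) PySem.Dict.empty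
    stats.items

-- ===== PRECONDITION & SPEC =====
-- A (and B) raise KeyError exactly when the key "vulnerabilities" is absent; Pre_ excludes only that.
def Pre_calculate_contributor_stats_py (session : List (String × List (List (String × String)))) : Prop :=
  (PySem.Dict.mk session).contains "vulnerabilities" = true
instance (session : List (String × List (List (String × String)))) : Decidable (Pre_calculate_contributor_stats_py session) := by unfold Pre_calculate_contributor_stats_py; infer_instance
def pvWitness_calculate_contributor_stats_py : (List (String × List (List (String × String)))) := [("vulnerabilities", [])]

-- On inputs where some vulnerability's severity (default "low") is the literal string
-- "vulnerabilities_found", A counts that vulnerability twice in that member's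
-- 'vulnerabilities_found' total (A's severity test matches the counter key itself);
-- B counts it once, which is the intended total of vulnerabilities found.
def D_calculate_contributor_stats_py (session : List (String × List (List (String × String)))) : Prop :=
  ∃ vuln ∈ ((session.lookup "vulnerabilities").getD []),
    (vuln.lookup "severity").getD "low" = "vulnerabilities_found"
instance (session : List (String × List (List (String × String)))) : Decidable (D_calculate_contributor_stats_py session) := by unfold D_calculate_contributor_stats_py; infer_instance

def Spec_calculate_contributor_stats_py (session : List (String × List (List (String × String)))) (out : List (String × List (String × Int))) : Prop := ¬ D_calculate_contributor_stats_py session → out = calculate_contributor_stats_py_alt session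
instance (session : List (String × List (List (String × String)))) (out : List (String × List (String × Int))) : Decidable (Spec_calculate_contributor_stats_py session out) := by unfold Spec_calculate_contributor_stats_py; infer_instance

def pvDiffWitness_calculate_contributor_stats_py : (List (String × List (List (String × String)))) :=
  [("vulnerabilities", [[("severity", "vulnerabilities_found")]])]
def pvDiffWitnessOut_calculate_contributor_stats_py : (List (String × List (String × Int))) × (List (String × List (String × Int))) :=
  ([("unknown", [("vulnerabilities_found", 2), ("critical", 0), ("high", 0), ("medium", 0), ("low", 0)])],
   [("unknown", [("vulnerabilities_found", 1), ("critical", 0), ("high", 0), ("medium", 0), ("low", 0)])])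

-- ===== CLAIM (what is proved, stated in full; the proofs are below) =====
def Claim_unchanged_calculate_contributor_stats_py : Prop := ∀ (session : List (String × List (List (String × String)))), Dom_calculate_contributor_stats_py session → Pre_calculate_contributor_stats_py session → Spec_calculate_contributor_stats_py session (calculate_contributor_stats_py session)
def Claim_changed_calculate_contributor_stats_py : Prop := Dom_calculate_contributor_stats_py (pvDiffWitness_calculate_contributor_stats_py) ∧ Pre_calculate_contributor_stats_py (pvDiffWitness_calculate_contributor_stats_py) ∧ D_calculate_contributor_stats_py (pvDiffWitness_calculate_contributor_stats_py) ∧ calculate_contributor_stats_py (pvDiffWitness_calculate_contributor_stats_py) = pvDiffWitnessOut_calculate_contributor_stats_py.1 ∧ calculate_contributor_stats_py_alt (pvDiffWitness_calculate_contributor_stats_py) = pvDiffWitnessOut_calculate_contributor_stats_py.2 ∧ pvDiffWitnessOut_calculate_contributor_stats_py.1 ≠ pvDiffWitnessOut_calculate_contributor_stats_py.2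
def Claim_exact_calculate_contributor_stats_py : Prop := ∀ (session : List (String × List (List (String × String)))), Dom_calculate_contributor_stats_py session → Pre_calculate_contributor_stats_py session → D_calculate_contributor_stats_py session → calculate_contributor_stats_py session ≠ calculate_contributor_stats_py_alt session

-- ===== LEMMAS AND PROOFS =====

def pvMOf (v : List (String × String)) : String := (PySem.Dict.mk v).getD "discovered_by" "unknown"
def pvSOf (v : List (String × String)) : String := (PySem.Dict.mk v).getD "severity" "low"
def pvCntM (vs : List (List (String × String))) (m : String) : Int := (vs.countP (fun v => pvMOf v == m) : Int)
def pvCntS (vs : List (List (String × String))) (m σ : String) : Int := (vs.countP (fun v => pvMOf v == m && pvSOf v == σ) : Int)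
def pvInner (a b c d e : Int) : List (String × Int) :=
  [("vulnerabilities_found", a), ("critical", b), ("high", c), ("medium", d), ("low", e)]
def pvG (s : String) (d : PySem.Dict String Int) : PySem.Dict String Int :=
  let d1 := d.modify "vulnerabilities_found" 0 (· + 1)
  if d1.contains s then d1.modify s 0 (· + 1) else d1
def pvInit : PySem.Dict String Int := PySem.Dict.mk (pvInner 0 0 0 0 0)
def pvInnerD (vs : List (List (String × String))) (m : String) : PySem.Dict String Int :=
  PySem.Dict.mk (pvInner (pvCntM vs m + pvCntS vs m "vulnerabilities_found")
    (pvCntS vs m "critical") (pvCntS vs m "high") (pvCntS vs m "medium") (pvCntS vs m "low"))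

lemma pvG_vf (a b c d e : Int) :
  pvG "vulnerabilities_found" (PySem.Dict.mk (pvInner a b c d e)) = PySem.Dict.mk (pvInner (a+1+1) b c d e) := rfl
lemma pvG_crit (a b c d e : Int) :
  pvG "critical" (PySem.Dict.mk (pvInner a b c d e)) = PySem.Dict.mk (pvInner (a+1) (b+1) c d e) := rfl
lemma pvG_high (a b c d e : Int) :
  pvG "high" (PySem.Dict.mk (pvInner a b c d e)) = PySem.Dict.mk (pvInner (a+1) b (c+1) d e) := rfl
lemma pvG_med (a b c d e : Int) :
  pvG "medium" (PySem.Dict.mk (pvInner a b c d e)) = PySem.Dict.mk (pvInner (a+1) b c (d+1) e) := rfl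
lemma pvG_low (a b c d e : Int) :
  pvG "low" (PySem.Dict.mk (pvInner a b c d e)) = PySem.Dict.mk (pvInner (a+1) b c d (e+1)) := rfl
lemma pvG_other (a b c d e : Int) (s : String) (h1 : ¬ s = "vulnerabilities_found") (h2 : ¬ s = "critical")
    (h3 : ¬ s = "high") (h4 : ¬ s = "medium") (h5 : ¬ s = "low") :
  pvG s (PySem.Dict.mk (pvInner a b c d e)) = PySem.Dict.mk (pvInner (a+1) b c d e) := by
  have g1 : ¬"vulnerabilities_found" = s := fun h => h1 h.symm
  have g2 : ¬"critical" = s := fun h => h2 h.symm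
  have g3 : ¬"high" = s := fun h => h3 h.symm
  have g4 : ¬"medium" = s := fun h => h4 h.symm
  have g5 : ¬"low" = s := fun h => h5 h.symm
  simp [pvG, pvInner, PySem.Dict.modify, PySem.Dict.contains, PySem.Dict.getD, PySem.Dict.get?,
    PySem.Dict.insert, PySem.Dict.keys, h1, h2, h3, h4, h5, g1, g2, g3, g4, g5]

lemma pvG_eval (s : String) (a b c d e : Int) :
    pvG s (PySem.Dict.mk (pvInner a b c d e)) = PySem.Dict.mk (pvInner
      (a + 1 + (if s = "vulnerabilities_found" then 1 else 0))
      (b + (if s = "critical" then 1 else 0))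
      (c + (if s = "high" then 1 else 0))
      (d + (if s = "medium" then 1 else 0))
      (e + (if s = "low" then 1 else 0))) := by
  by_cases h1 : s = "vulnerabilities_found"
  · subst h1; rw [pvG_vf]; simp
  by_cases h2 : s = "critical"
  · subst h2; rw [pvG_crit]; simp
  by_cases h3 : s = "high"
  · subst h3; rw [pvG_high]; simp
  by_cases h4 : s = "medium"
  · subst h4; rw [pvG_med]; simp
  by_cases h5 : s = "low"
  · subst h5; rw [pvG_low]; simp
  rw [pvG_other a b c d e s h1 h2 h3 h4 h5]; simp [h1, h2, h3, h4, h5]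

-- counts after appending one record
lemma pvCntM_append (vs : List (List (String × String))) (v : List (String × String)) (m : String) :
    pvCntM (vs ++ [v]) m = pvCntM vs m + (if pvMOf v = m then 1 else 0) := by
  simp only [pvCntM, List.countP_append, List.countP_cons, List.countP_nil]
  push_cast
  simp only [beq_iff_eq]
  split_ifs with h <;> simp [h]
lemma pvCntS_append (vs : List (List (String × String))) (v : List (String × String)) (m σ : String) :
    pvCntS (vs ++ [v]) m σ = pvCntS vs m σ + (if pvMOf v = m ∧ pvSOf v = σ then 1 else 0) := by
  simp only [pvCntS, List.countP_append, List.countP_cons, List.countP_nil]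
  push_cast
  simp only [beq_iff_eq, Bool.and_eq_true, decide_eq_true_eq]
  split_ifs with h <;> simp_all

lemma pvInnerD_append_other (vs : List (List (String × String))) (v : List (String × String)) (m : String)
    (h : ¬ pvMOf v = m) : pvInnerD (vs ++ [v]) m = pvInnerD vs m := by
  simp [pvInnerD, pvCntM_append, pvCntS_append, h]

lemma pvInnerD_append_self (vs : List (List (String × String))) (v : List (String × String)) :
    pvInnerD (vs ++ [v]) (pvMOf v) = pvG (pvSOf v) (pvInnerD vs (pvMOf v)) := by
  conv_rhs => rw [pvInnerD, pvG_eval]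
  simp only [pvInnerD, pvCntM_append, pvCntS_append, pvInner]
  simp
  split_ifs <;> (try simp_all) <;> omega

def pvStepA (stats : PySem.Dict String (PySem.Dict String Int)) (vuln : List (String × String)) :
    PySem.Dict String (PySem.Dict String Int) :=
  let member := (PySem.Dict.mk vuln).getD "discovered_by" "unknown"
  let stats :=
    if stats.contains member then stats
    else stats.insert member (PySem.Dict.mk
      [("vulnerabilities_found", 0), ("critical", 0), ("high", 0), ("medium", 0), ("low", 0)])
  let stats := stats.modify member PySem.Dict.empty (fun d => d.modify "vulnerabilities_found" 0 (· + 1))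
  let severity := (PySem.Dict.mk vuln).getD "severity" "low"
  if (stats.getD member PySem.Dict.empty).contains severity then
    stats.modify member PySem.Dict.empty (fun d => d.modify severity 0 (· + 1))
  else stats

lemma pvStep_eq (D : PySem.Dict String (PySem.Dict String Int)) (v : List (String × String)) :
    pvStepA D v = D.insert (pvMOf v)
      (pvG (pvSOf v) (if D.contains (pvMOf v) then D.getD (pvMOf v) PySem.Dict.empty else pvInit)) := by
  unfold pvStepA pvG
  simp only [pvMOf, pvSOf]
  by_cases h : D.contains ((PySem.Dict.mk v).getD "discovered_by" "unknown")
  · simp only [h, if_true, PySem.Dict.modify, PySem.Dict.getD_insert_self, PySem.Dict.insert_insert_self]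
    split_ifs <;> rfl
  · simp only [h, if_false, Bool.false_eq_true, PySem.Dict.modify, PySem.Dict.getD_insert_self,
      PySem.Dict.insert_insert_self, pvInit, pvInner]
    split_ifs <;> rfl

lemma pvCntM_zero (vs : List (List (String × String))) (m : String) (h : m ∉ vs.map pvMOf) :
    pvCntM vs m = 0 := by
  simp only [pvCntM]
  norm_cast
  rw [List.countP_eq_zero]
  intro v hv
  simp only [beq_iff_eq]
  exact fun he => h (he ▸ List.mem_map_of_mem hv)

lemma pvCntS_zero (vs : List (List (String × String))) (m σ : String) (h : m ∉ vs.map pvMOf) :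
    pvCntS vs m σ = 0 := by
  simp only [pvCntS]
  norm_cast
  rw [List.countP_eq_zero]
  intro v hv
  simp only [Bool.and_eq_true, beq_iff_eq]
  exact fun he => h (he.1 ▸ List.mem_map_of_mem hv)

lemma pvA_items (vs : List (List (String × String))) :
    (vs.foldl pvStepA PySem.Dict.empty).items
      = (PySem.Set.ofList (vs.map pvMOf)).map (fun m => (m, pvInnerD vs m)) := by
  induction vs using List.reverseRecOn with
  | nil => rfl
  | append_singleton vs v ih =>
    rw [List.foldl_append, List.foldl_cons, List.foldl_nil, pvStep_eq]
    have hkeys : (vs.foldl pvStepA PySem.Dict.empty).keys = PySem.Set.ofList (vs.map pvMOf) := by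
      simp only [PySem.Dict.keys, ih, List.map_map]
      simp [Function.comp_def]
    have hnodup : (vs.foldl pvStepA PySem.Dict.empty).keys.Nodup := by
      rw [hkeys]; exact PySem.Set.nodup_ofList _
    by_cases hm : pvMOf v ∈ vs.map pvMOf
    · have hcont : (vs.foldl pvStepA PySem.Dict.empty).contains (pvMOf v) = true := by
        rw [PySem.Dict.contains_eq_decide_mem_keys, hkeys]
        simp [PySem.Set.mem_ofList, hm]
      have hmemS : pvMOf v ∈ PySem.Set.ofList (vs.map pvMOf) := (PySem.Set.mem_ofList _ _).mpr hm
      have hgetD : (vs.foldl pvStepA PySem.Dict.empty).getD (pvMOf v) PySem.Dict.empty = pvInnerD vs (pvMOf v) := by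
        exact PySem.Dict.getD_of_mem_items _ (by rw [ih]; exact List.mem_map_of_mem hmemS) hnodup _
      have hset : PySem.Set.ofList ((vs ++ [v]).map pvMOf) = PySem.Set.ofList (vs.map pvMOf) := by
        rw [List.map_append, PySem.Set.ofList_eq_foldl, List.foldl_append, ← PySem.Set.ofList_eq_foldl]
        simp only [List.map_cons, List.map_nil, List.foldl_cons, List.foldl_nil]
        simp [PySem.Set.add, PySem.Set.contains, List.elem_iff, (PySem.Set.mem_ofList _ _).mpr hm]
      rw [hcont, if_pos rfl, hgetD, PySem.Dict.items_insert_of_contains _ _ hcont, ih, List.map_map, hset]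
      apply List.map_congr_left
      intro m hmem
      by_cases he : m = pvMOf v
      · subst he
        simp [pvInnerD_append_self]
      · have : ¬ (m == pvMOf v) = true := by simp [he]
        simp only [Function.comp_def, this, if_neg, Bool.false_eq_true]
        rw [pvInnerD_append_other vs v m (fun hh => he hh.symm)]
        simp [this]
    · have hcont : (vs.foldl pvStepA PySem.Dict.empty).contains (pvMOf v) = false := by
        rw [PySem.Dict.contains_eq_decide_mem_keys, hkeys]
        simp [PySem.Set.mem_ofList, hm]
      have hset : PySem.Set.ofList ((vs ++ [v]).map pvMOf) = PySem.Set.ofList (vs.map pvMOf) ++ [pvMOf v] := by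
        rw [List.map_append, PySem.Set.ofList_eq_foldl, List.foldl_append, ← PySem.Set.ofList_eq_foldl]
        simp only [List.map_cons, List.map_nil, List.foldl_cons, List.foldl_nil]
        simp [PySem.Set.add, PySem.Set.contains, List.elem_iff, (PySem.Set.mem_ofList _ _), hm]
      rw [hcont, if_neg (by simp), PySem.Dict.items_insert_of_not_contains _ _ hcont, ih, hset]
      rw [List.map_append]
      congr 1
      · apply List.map_congr_left
        intro m hmem
        have hne : ¬ pvMOf v = m := by
          intro hh
          exact hm (hh ▸ (PySem.Set.mem_ofList _ _).mp hmem)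
        rw [pvInnerD_append_other vs v m hne]
      · have : pvG (pvSOf v) pvInit = pvInnerD (vs ++ [v]) (pvMOf v) := by
          rw [pvInit, pvG_eval]
          simp only [pvInnerD, pvCntM_append, pvCntS_append,
            pvCntM_zero vs (pvMOf v) hm, pvCntS_zero vs (pvMOf v) _ hm]
          simp
        rw [this]
        rfl

-- A's result in closed form (B's, pvShapeB below, lacks the pvCntS … "vulnerabilities_found" summand)
def pvShapeA (vs : List (List (String × String))) : List (String × List (String × Int)) :=
  (PySem.Set.ofList (vs.map pvMOf)).map (fun m =>
    (m, pvInner (pvCntM vs m + pvCntS vs m "vulnerabilities_found")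
        (pvCntS vs m "critical") (pvCntS vs m "high") (pvCntS vs m "medium") (pvCntS vs m "low")))

lemma pvA_closed (vs : List (List (String × String))) :
    ((vs.foldl (fun stats vuln =>
        let member := (PySem.Dict.mk vuln).getD "discovered_by" "unknown"
        let stats :=
          if stats.contains member then stats
          else stats.insert member (PySem.Dict.mk
            [("vulnerabilities_found", 0), ("critical", 0), ("high", 0), ("medium", 0), ("low", 0)])
        let stats := stats.modify member PySem.Dict.empty (fun d => d.modify "vulnerabilities_found" 0 (· + 1))
        let severity := (PySem.Dict.mk vuln).getD "severity" "low"
        if (stats.getD member PySem.Dict.empty).contains severity then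
          stats.modify member PySem.Dict.empty (fun d => d.modify severity 0 (· + 1))
        else stats) PySem.Dict.empty).items).map (fun p => (p.1, p.2.items))
    = pvShapeA vs := by
  have hfun : (fun (stats : PySem.Dict String (PySem.Dict String Int)) vuln =>
        let member := (PySem.Dict.mk vuln).getD "discovered_by" "unknown"
        let stats :=
          if stats.contains member then stats
          else stats.insert member (PySem.Dict.mk
            [("vulnerabilities_found", 0), ("critical", 0), ("high", 0), ("medium", 0), ("low", 0)])
        let stats := stats.modify member PySem.Dict.empty (fun d => d.modify "vulnerabilities_found" 0 (· + 1))
        let severity := (PySem.Dict.mk vuln).getD "severity" "low"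
        if (stats.getD member PySem.Dict.empty).contains severity then
          stats.modify member PySem.Dict.empty (fun d => d.modify severity 0 (· + 1))
        else stats) = pvStepA := rfl
  rw [hfun, pvA_items, List.map_map]
  rfl

-- B's closed form
def pvShapeB (vs : List (List (String × String))) : List (String × List (String × Int)) :=
  (PySem.Set.ofList (vs.map pvMOf)).map (fun m =>
    (m, pvInner (pvCntM vs m)
        (pvCntS vs m "critical") (pvCntS vs m "high") (pvCntS vs m "medium") (pvCntS vs m "low")))

-- inserting fresh keys along a nodup list: items of the built dict = the map
lemma pvFold_insert_items {ν : Type} (f : String → ν) (ms : List String) (h : ms.Nodup) :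
    (ms.foldl (fun (d : PySem.Dict String ν) m => d.insert m (f m)) PySem.Dict.empty).items
      = ms.map (fun m => (m, f m)) := by
  induction ms using List.reverseRecOn with
  | nil => rfl
  | append_singleton ms m ih =>
    have hnd := h.sublist (List.sublist_append_left ms [m])
    have hm : m ∉ ms := fun hmem =>
      (List.nodup_append.mp h).2.2 m hmem m (by simp) rfl
    have ihs := ih hnd
    rw [List.foldl_append, List.foldl_cons, List.foldl_nil]
    have hcont : (ms.foldl (fun (d : PySem.Dict String ν) m => d.insert m (f m)) PySem.Dict.empty).contains m = false := by
      rw [PySem.Dict.contains_eq_decide_mem_keys]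
      simp only [PySem.Dict.keys, ihs, List.map_map]
      simp [Function.comp_def, hm]
    rw [PySem.Dict.items_insert_of_not_contains _ _ hcont, ihs, List.map_append]
    rfl

lemma pvMine_counts (vs : List (List (String × String))) (m σ : String) :
    (((vs.filter (fun v => (PySem.Dict.mk v).getD "discovered_by" "unknown" == m)).countP
        (fun v => (PySem.Dict.mk v).getD "severity" "low" == σ) : Nat) : Int)
      = pvCntS vs m σ := by
  show (((vs.filter (fun v => pvMOf v == m)).countP (fun v => pvSOf v == σ) : Nat) : Int) = pvCntS vs m σ
  rw [List.countP_filter]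
  simp only [pvCntS]
  norm_cast
  apply List.countP_congr
  intro v _
  simp [Bool.and_comm]

lemma pvB_closed (vs : List (List (String × String))) :
    (let members : PySem.Set String :=
      vs.foldl (fun ms v => PySem.Set.add ms ((PySem.Dict.mk v).getD "discovered_by" "unknown")) PySem.Set.empty
     let stats : PySem.Dict String (List (String × Int)) :=
      members.foldl (fun stats m =>
        let mine := vs.filter (fun v => (PySem.Dict.mk v).getD "discovered_by" "unknown" == m)
        stats.insert m
          [("vulnerabilities_found", (mine.length : Int)),
           ("critical", (mine.countP (fun v => (PySem.Dict.mk v).getD "severity" "low" == "critical") : Int)),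
           ("high", (mine.countP (fun v => (PySem.Dict.mk v).getD "severity" "low" == "high") : Int)),
           ("medium", (mine.countP (fun v => (PySem.Dict.mk v).getD "severity" "low" == "medium") : Int)),
           ("low", (mine.countP (fun v => (PySem.Dict.mk v).getD "severity" "low" == "low") : Int))]) PySem.Dict.empty
     stats.items)
    = pvShapeB vs := by
  have hmembers : vs.foldl (fun ms v => PySem.Set.add ms ((PySem.Dict.mk v).getD "discovered_by" "unknown")) PySem.Set.empty
      = PySem.Set.ofList (vs.map pvMOf) := by
    rw [← PySem.Set.update_map_eq_foldl_add]
    exact PySem.Set.update_nil_left _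
  simp only [hmembers]
  rw [pvFold_insert_items _ _ (PySem.Set.nodup_ofList _)]
  apply List.map_congr_left
  intro m _
  simp only [pvShapeB, pvInner]
  refine congrArg (Prod.mk m) ?_
  have hlen : ((vs.filter (fun v => (PySem.Dict.mk v).getD "discovered_by" "unknown" == m)).length : Int) = pvCntM vs m := by
    rw [← List.countP_eq_length_filter]
    simp [pvCntM, pvMOf]
  rw [hlen, pvMine_counts vs m "critical", pvMine_counts vs m "high",
      pvMine_counts vs m "medium", pvMine_counts vs m "low"]

lemma pvShape_eq (vs : List (List (String × String)))
    (h : ∀ v ∈ vs, ¬ pvSOf v = "vulnerabilities_found") : pvShapeA vs = pvShapeB vs := by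
  unfold pvShapeA pvShapeB
  apply List.map_congr_left
  intro m _
  have hz : pvCntS vs m "vulnerabilities_found" = 0 := by
    simp only [pvCntS]
    norm_cast
    rw [List.countP_eq_zero]
    intro v hv
    simp [h v hv]
  rw [hz, add_zero]

lemma pvCntS_pos (vs : List (List (String × String))) (v : List (String × String))
    (hv : v ∈ vs) (hs : pvSOf v = "vulnerabilities_found") :
    0 < pvCntS vs (pvMOf v) "vulnerabilities_found" := by
  simp only [pvCntS]
  have : 0 < vs.countP (fun w => pvMOf w == pvMOf v && pvSOf w == "vulnerabilities_found") := by
    rw [List.countP_pos_iff]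
    exact ⟨v, hv, by simp [hs]⟩
  exact_mod_cast this

-- Python's first-match dict lookup: D_'s List.lookup agrees with the ports' Dict.get?
lemma pvLookup_eq {α : Type} (l : List (String × α)) (k : String) :
    l.lookup k = (PySem.Dict.mk l).get? k := by
  induction l with
  | nil => rfl
  | cons p rest ih =>
    rw [PySem.Dict.get?_mk_cons]
    cases p with
    | mk a b =>
      by_cases h : a = k
      · subst h; simp [List.lookup]
      · have h' : (k == a) = false := by simp [Ne.symm h]
        simp [List.lookup, h, h', ih]

-- ===== VERDICT (by name: the statement is the Claim_ definition above) =====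
theorem calculate_contributor_stats_py_spec : Claim_unchanged_calculate_contributor_stats_py := by
  intro session _ hpre hnd
  unfold calculate_contributor_stats_py calculate_contributor_stats_py_alt
  cases h : (PySem.Dict.mk session).get? "vulnerabilities" with
  | none =>
    exfalso
    have hc : (PySem.Dict.mk session).contains "vulnerabilities" = true := hpre
    rw [PySem.Dict.contains_eq_isSome_get?, h] at hc
    exact Bool.false_ne_true hc
  | some vulns =>
    simp only []
    rw [pvA_closed, pvB_closed]
    apply pvShape_eq
    intro v hv hs
    refine hnd ⟨v, ?_, ?_⟩
    · rw [pvLookup_eq, h]; exact hv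
    · rw [pvLookup_eq]
      have : pvSOf v = "vulnerabilities_found" := hs
      rw [pvSOf, PySem.Dict.getD_eq_get?_getD] at this
      exact this

theorem calculate_contributor_stats_py_changed : Claim_changed_calculate_contributor_stats_py := by
  unfold Claim_changed_calculate_contributor_stats_py; decide

theorem calculate_contributor_stats_py_tight : Claim_exact_calculate_contributor_stats_py := by
  intro session _ hpre hd heq
  obtain ⟨v, hv, hs⟩ := hd
  have hsome : ∃ vulns, (PySem.Dict.mk session).get? "vulnerabilities" = some vulns := by
    have : (PySem.Dict.mk session).contains "vulnerabilities" = true := hpre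
    rw [PySem.Dict.contains_eq_isSome_get?] at this
    exact Option.isSome_iff_exists.mp this
  obtain ⟨vulns, h⟩ := hsome
  rw [pvLookup_eq, h] at hv
  simp only [Option.getD_some] at hv
  rw [pvLookup_eq] at hs
  have hs : pvSOf v = "vulnerabilities_found" := by
    rw [pvSOf, PySem.Dict.getD_eq_get?_getD]; exact hs
  rw [calculate_contributor_stats_py, calculate_contributor_stats_py_alt, h] at heq
  simp only [] at heq
  rw [pvA_closed, pvB_closed] at heq
  unfold pvShapeA pvShapeB at heq
  have hmem : pvMOf v ∈ PySem.Set.ofList (vulns.map pvMOf) :=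
    (PySem.Set.mem_ofList _ _).mpr (List.mem_map_of_mem hv)
  have := (List.map_inj_left.mp heq) (pvMOf v) hmem
  have hvf : pvCntM vulns (pvMOf v) + pvCntS vulns (pvMOf v) "vulnerabilities_found"
      = pvCntM vulns (pvMOf v) := by
    have h2 := congrArg Prod.snd this
    simp only [pvInner, List.cons.injEq, Prod.mk.injEq] at h2
    exact h2.1.2
  have := pvCntS_pos vulns v hv hs
  omega
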